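-- pv_equiv track=rewrite | github.com/kkihui/BOJ | 백준/Bronze/15104. Odd Palindrome/Odd Palindrome.py | evenpalindrome
-- ===== SOURCE A (Python) =====
-- def evenpalindrome(a):
--     l = len(a)
--     for _ in range(l):# 앞의 글자와 반대편의 글자가 다르면 palindrome 아님
--         if a[_] != a[l-1-_]:
--             return False
--     if l%2 == 1: # palindrome이 odd면 oddpalindrome
--         return False
--     else: # even이 있으면 even palindrome
--         return True
-- ===== SOURCE B (Python) =====
-- def evenpalindrome(a):
--     return len(a) % 2 == 0 and a == a[::-1]
-- ===== Notes on version B (the rewrite author's own statement) =====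
-- stated objective: simpler
-- what changed: Replaces the explicit index loop comparing a[i] with a[l-1-i] plus a trailing parity branch by a single boolean expression: even length AND the string equals its reverse.
import Mathlib
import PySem

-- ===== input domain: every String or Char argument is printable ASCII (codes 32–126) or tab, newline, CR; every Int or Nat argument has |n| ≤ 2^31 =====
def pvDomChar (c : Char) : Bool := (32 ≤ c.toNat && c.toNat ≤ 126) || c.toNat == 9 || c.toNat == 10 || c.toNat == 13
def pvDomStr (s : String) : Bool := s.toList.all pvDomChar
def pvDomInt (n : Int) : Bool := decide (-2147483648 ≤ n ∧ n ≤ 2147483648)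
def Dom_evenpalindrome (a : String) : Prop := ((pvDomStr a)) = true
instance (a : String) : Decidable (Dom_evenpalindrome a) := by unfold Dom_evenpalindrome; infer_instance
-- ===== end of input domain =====

-- B replaces A's index loop + parity branch by one boolean expression (even length AND equal to reverse); same values everywhere.

-- ===== PORT A =====
-- the for-loop over range(l): index i runs from 0, comparing a[i] with a[l-1-i]; early return False on mismatch
def evenpalindromeGo (cs : List Char) (l : Nat) (i : Nat) : Bool :=
  if i < l then
    if cs.getD i ' ' != cs.getD (l - 1 - i) ' ' then false
    else evenpalindromeGo cs l (i + 1)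
  else
    if l % 2 == 1 then false else true
termination_by l - i

def evenpalindrome (a : String) : Bool :=
  let cs := a.toList
  evenpalindromeGo cs cs.length 0

-- ===== PORT B =====
def evenpalindrome_alt (a : String) : Bool :=
  let cs := a.toList
  cs.length % 2 == 0 && cs == cs.reverse

-- ===== PRECONDITION & SPEC =====
def Spec_evenpalindrome (a : String) (out : Bool) : Prop := out = evenpalindrome_alt a
instance (a : String) (out : Bool) : Decidable (Spec_evenpalindrome a out) := by unfold Spec_evenpalindrome; infer_instance

-- ===== CLAIM (what is proved, stated in full; the proofs are below) =====
def Claim_equal_evenpalindrome : Prop := ∀ (a : String), Dom_evenpalindrome a → Spec_evenpalindrome a (evenpalindrome a)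

-- ===== LEMMAS AND PROOFS =====

theorem evenpalindromeGo_eq (cs : List Char) (l i : Nat) :
    evenpalindromeGo cs l i =
      if (∀ j, i ≤ j → j < l → cs.getD j ' ' = cs.getD (l - 1 - j) ' ')
      then (if l % 2 == 1 then false else true) else false := by
  by_cases h : i < l
  · by_cases hm : cs.getD i ' ' = cs.getD (l - 1 - i) ' '
    · have hb : (cs.getD i ' ' != cs.getD (l - 1 - i) ' ') = false := by
        rw [hm]; exact bne_self_eq_false _
      have key : (∀ j, i + 1 ≤ j → j < l → cs.getD j ' ' = cs.getD (l - 1 - j) ' ')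
          ↔ (∀ j, i ≤ j → j < l → cs.getD j ' ' = cs.getD (l - 1 - j) ' ') := by
        constructor
        · intro hall j hij hjl
          rcases Nat.eq_or_lt_of_le hij with rfl | hlt
          · exact hm
          · exact hall j hlt hjl
        · intro hall j hij hjl
          exact hall j (Nat.le_of_succ_le hij) hjl
      rw [evenpalindromeGo, if_pos h, hb, evenpalindromeGo_eq cs l (i + 1)]
      simp only [Bool.false_eq_true, if_false]
      exact if_congr key rfl rfl
    · have hb : (cs.getD i ' ' != cs.getD (l - 1 - i) ' ') = true := bne_iff_ne.mpr hm
      have hP : ¬ (∀ j, i ≤ j → j < l → cs.getD j ' ' = cs.getD (l - 1 - j) ' ') :=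
        fun hall => hm (hall i le_rfl h)
      rw [evenpalindromeGo, if_pos h, hb, if_neg hP]
      simp
  · have hP : ∀ j, i ≤ j → j < l → cs.getD j ' ' = cs.getD (l - 1 - j) ' ' :=
      fun j hij hjl => absurd (Nat.lt_of_le_of_lt hij hjl) h
    rw [evenpalindromeGo, if_neg h, if_pos hP]
termination_by l - i

theorem pal_char (cs : List Char) :
    (cs == cs.reverse) = true ↔
      ∀ j, 0 ≤ j → j < cs.length → cs.getD j ' ' = cs.getD (cs.length - 1 - j) ' ' := by
  rw [beq_iff_eq]
  constructor
  · intro h j _ hj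
    rw [List.getD_eq_getElem cs ' ' hj,
        List.getD_eq_getElem cs ' ' (by omega : cs.length - 1 - j < cs.length)]
    calc cs[j] = cs.reverse[j]'(by simpa using hj) := List.getElem_of_eq h hj
      _ = cs[cs.length - 1 - j]'(by omega) := by
          rw [List.getElem_reverse]
  · intro h
    apply List.ext_getElem (by simp)
    intro j hj hj'
    rw [List.getElem_reverse]
    have := h j (Nat.zero_le _) hj
    rwa [List.getD_eq_getElem cs ' ' hj,
         List.getD_eq_getElem cs ' ' (by omega : cs.length - 1 - j < cs.length)] at this

theorem parity_eq (l : Nat) :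
    (if l % 2 == 1 then false else true) = (l % 2 == 0) := by
  rcases Nat.mod_two_eq_zero_or_one l with h | h <;> simp [h]

-- ===== VERDICT (by name: the statement is the Claim_ definition above) =====
theorem evenpalindrome_spec : Claim_equal_evenpalindrome := by
  intro a _
  unfold Spec_evenpalindrome
  show evenpalindromeGo a.toList a.toList.length 0 =
      (a.toList.length % 2 == 0 && a.toList == a.toList.reverse)
  rw [evenpalindromeGo_eq]
  by_cases hp : ∀ j, 0 ≤ j → j < a.toList.length →
      a.toList.getD j ' ' = a.toList.getD (a.toList.length - 1 - j) ' '
  · rw [if_pos (fun j _ => hp j (Nat.zero_le _)), parity_eq, (pal_char a.toList).mpr hp]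
    simp
  · rw [if_neg (fun h => hp fun j _ hj => h j (Nat.zero_le _) hj)]
    have : (a.toList == a.toList.reverse) = false := by
      rcases hb : (a.toList == a.toList.reverse) with _ | _
      · rfl
      · exact absurd ((pal_char a.toList).mp hb) hp
    simp [this]
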